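-- pv_equiv track=rewrite | github.com/xmrenigmax/DSA-Assignment | src/algorthms/genetic.py | _decode_chromosome
-- ===== SOURCE A (Python) =====
-- def _decode_chromosome(chromosome: list, demands: list,
--                        vehicle_capacity: int) -> list:
--     """
--     Split a chromosome (customer permutation) into feasible routes.
--
--     Customers are appended to the current route until the next customer
--     would exceed the vehicle capacity, at which point a new route begins.
--
--     Returns
--     -------
--     list[list[int]]  Each inner list: [0, c1, c2, ..., 0]
--     """
--     routes = []
--     current_route = [0]
--     current_load = 0
--
--     for customer in chromosome:
--         if current_load + demands[customer] <= vehicle_capacity: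
--             current_route.append(customer)
--             current_load += demands[customer]
--         else:
--             current_route.append(0)
--             routes.append(current_route)
--             current_route = [0, customer]
--             current_load = demands[customer]
--
--     current_route.append(0)
--     routes.append(current_route)
--     return routes
-- ===== SOURCE B (Python) =====
-- def _decode_chromosome(chromosome: list, demands: list,
--                        vehicle_capacity: int) -> list:
--     # Two-pass: first find the break positions, then slice the chromosome.
--     breaks = []
--     load = 0
--     for i, customer in enumerate(chromosome):
--         d = demands[customer]
--         if load + d <= vehicle_capacity:
--             load += d
--         else:
--             breaks.append(i)
--             load = d
--     bounds = [0] + breaks + [len(chromosome)]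
--     return [[0] + chromosome[a:b] + [0] for a, b in zip(bounds, bounds[1:])]
-- ===== Notes on version B (the rewrite author's own statement) =====
-- stated objective: alternative
-- what changed: B replaces A's single loop that mutates a growing current route with a two-pass decomposition: one pass records break positions, a second pass slices the chromosome at those bounds and wraps each segment in depot zeros.
import Mathlib
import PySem

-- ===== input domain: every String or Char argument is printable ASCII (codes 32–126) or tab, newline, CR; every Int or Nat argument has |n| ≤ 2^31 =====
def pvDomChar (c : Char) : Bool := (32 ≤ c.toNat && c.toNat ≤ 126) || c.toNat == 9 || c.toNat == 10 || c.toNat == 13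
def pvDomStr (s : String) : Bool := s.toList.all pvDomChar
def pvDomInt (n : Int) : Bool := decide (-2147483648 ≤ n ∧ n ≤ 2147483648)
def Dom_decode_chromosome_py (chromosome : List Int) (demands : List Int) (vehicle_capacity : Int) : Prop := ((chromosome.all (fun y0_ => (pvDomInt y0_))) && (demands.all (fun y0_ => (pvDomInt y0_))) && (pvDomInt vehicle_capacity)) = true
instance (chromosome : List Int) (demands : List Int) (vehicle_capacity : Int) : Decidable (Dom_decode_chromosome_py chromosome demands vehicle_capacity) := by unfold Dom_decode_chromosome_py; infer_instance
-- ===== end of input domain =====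

-- B re-decomposes A's route building into two passes (break positions, then slicing); same O(n) cost (objective: alternative).

-- ===== PORT A =====
-- A's loop over the chromosome with state (routes, current_route, current_load);
-- demands[customer] is PySem.List.pyGet? (negative indices wrap as in Python); under
-- Pre_ the lookup is always `some`, so `.getD 0` never supplies the default.
def decode_chromosome_py (chromosome : List Int) (demands : List Int) (vehicle_capacity : Int) : List (List Int) :=
  let st := chromosome.foldl
    (fun (s : List (List Int) × List Int × Int) customer =>
      let d := (PySem.List.pyGet? demands customer).getD 0
      if s.2.2 + d ≤ vehicle_capacity then
        (s.1, s.2.1 ++ [customer], s.2.2 + d)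
      else
        (s.1 ++ [s.2.1 ++ [0]], [0, customer], d))
    ([], [0], 0)
  st.1 ++ [st.2.1 ++ [0]]

-- ===== PORT B =====
-- B's first pass: foldl over enumerate(chromosome) collecting break positions;
-- second pass: zip the bounds list with its tail and slice.
def decode_chromosome_py_alt (chromosome : List Int) (demands : List Int) (vehicle_capacity : Int) : List (List Int) :=
  let st := (PySem.List.enumerate chromosome 0).foldl
    (fun (s : List Int × Int) p =>
      let d := (PySem.List.pyGet? demands p.2).getD 0
      if s.2 + d ≤ vehicle_capacity then (s.1, s.2 + d)
      else (s.1 ++ [p.1], d))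
    ([], 0)
  let bounds : List Int := 0 :: st.1 ++ [(chromosome.length : Int)]
  (bounds.zip bounds.tail).map
    (fun p => 0 :: PySem.List.slice chromosome (some p.1) (some p.2) ++ [0])

-- ===== PRECONDITION & SPEC =====
-- Pre_ excludes exactly the inputs where Python's demands[customer] raises IndexError.
def Pre_decode_chromosome_py (chromosome : List Int) (demands : List Int) (vehicle_capacity : Int) : Prop :=
  ∀ c ∈ chromosome, PySem.Raise.InRange demands.length c
instance (chromosome : List Int) (demands : List Int) (vehicle_capacity : Int) : Decidable (Pre_decode_chromosome_py chromosome demands vehicle_capacity) := by unfold Pre_decode_chromosome_py; infer_instance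
def pvWitness_decode_chromosome_py : List Int × List Int × Int := ([0, 1], [3, 4], 10)

def Spec_decode_chromosome_py (chromosome : List Int) (demands : List Int) (vehicle_capacity : Int) (out : List (List Int)) : Prop := out = decode_chromosome_py_alt chromosome demands vehicle_capacity
instance (chromosome : List Int) (demands : List Int) (vehicle_capacity : Int) (out : List (List Int)) : Decidable (Spec_decode_chromosome_py chromosome demands vehicle_capacity out) := by unfold Spec_decode_chromosome_py; infer_instance

-- ===== CLAIM (what is proved, stated in full; the proofs are below) =====
def Claim_equal_decode_chromosome_py : Prop := ∀ (chromosome : List Int) (demands : List Int) (vehicle_capacity : Int), Dom_decode_chromosome_py chromosome demands vehicle_capacity → Pre_decode_chromosome_py chromosome demands vehicle_capacity → Spec_decode_chromosome_py chromosome demands vehicle_capacity (decode_chromosome_py chromosome demands vehicle_capacity)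

-- ===== LEMMAS AND PROOFS =====

-- demand of a customer, as both ports compute it
def pvDem (demands : List Int) (c : Int) : Int := (PySem.List.pyGet? demands c).getD 0

-- break positions (Nat indices) of the greedy split, starting at index k with load `load`
def pvBreaks (dm : List Int) (cap : Int) : List Int → Nat → Int → List Nat
  | [], _, _ => []
  | c :: t, k, load =>
      if load + pvDem dm c ≤ cap then pvBreaks dm cap t (k + 1) (load + pvDem dm c)
      else k :: pvBreaks dm cap t (k + 1) (pvDem dm c)

def pvConsHead (c : Int) : List (List Int) → List (List Int)
  | [] => [[c]]
  | s :: ss => (c :: s) :: ss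

-- the greedy segments (routes without the surrounding depots)
def pvSegs (dm : List Int) (cap : Int) : List Int → Int → List (List Int)
  | [], _ => [[]]
  | c :: t, load =>
      if load + pvDem dm c ≤ cap then pvConsHead c (pvSegs dm cap t (load + pvDem dm c))
      else [] :: pvConsHead c (pvSegs dm cap t (pvDem dm c))

def pvPrefixFirst (pre : List Int) : List (List Int) → List (List Int)
  | [] => [pre]
  | s :: ss => (pre ++ s) :: ss

-- segments cut out of L by consecutive Nat bounds
def pvPairSlices (L : List Int) (bd : List Nat) : List (List Int) :=
  (bd.zip bd.tail).map (fun p => (L.drop p.1).take (p.2 - p.1))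

theorem pvSegs_ne_nil (dm : List Int) (cap : Int) (xs : List Int) (load : Int) :
    pvSegs dm cap xs load ≠ [] := by
  cases xs with
  | nil => simp [pvSegs]
  | cons c t =>
    simp only [pvSegs]
    split
    · cases h : pvSegs dm cap t (load + pvDem dm c) <;> simp [pvConsHead]
    · simp

theorem pvBreaks_mem_ge (dm : List Int) (cap : Int) (xs : List Int) (k : Nat) (load : Int)
    (b : Nat) (hb : b ∈ pvBreaks dm cap xs k load) : k ≤ b := by
  induction xs generalizing k load with
  | nil => simp [pvBreaks] at hb
  | cons c t ih =>
    simp only [pvBreaks] at hb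
    split at hb
    · exact Nat.le_of_succ_le (ih (k + 1) _ hb)
    · rcases List.mem_cons.mp hb with h | h
      · omega
      · exact Nat.le_of_succ_le (ih (k + 1) _ h)

-- A's fold equals the segments, with the pending partial route `0 :: pre` prefixed
theorem pvFoldA_eq (dm : List Int) (cap : Int) (xs : List Int) :
    ∀ (rs : List (List Int)) (pre : List Int) (load : Int),
    (xs.foldl
        (fun (s : List (List Int) × List Int × Int) customer =>
          let d := (PySem.List.pyGet? dm customer).getD 0
          if s.2.2 + d ≤ cap then (s.1, s.2.1 ++ [customer], s.2.2 + d)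
          else (s.1 ++ [s.2.1 ++ [0]], [0, customer], d)) (rs, 0 :: pre, load)).1
      ++ [(xs.foldl
        (fun (s : List (List Int) × List Int × Int) customer =>
          let d := (PySem.List.pyGet? dm customer).getD 0
          if s.2.2 + d ≤ cap then (s.1, s.2.1 ++ [customer], s.2.2 + d)
          else (s.1 ++ [s.2.1 ++ [0]], [0, customer], d)) (rs, 0 :: pre, load)).2.1 ++ [0]]
    = rs ++ (pvPrefixFirst pre (pvSegs dm cap xs load)).map (fun s => 0 :: s ++ [0]) := by
  induction xs with
  | nil => intro rs pre load; simp [pvSegs, pvPrefixFirst]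
  | cons c t ih =>
    intro rs pre load
    simp only [List.foldl_cons, pvSegs]
    by_cases h : load + pvDem dm c ≤ cap
    · rw [if_pos (by simpa [pvDem] using h)]
      simp only [if_pos h]
      have h1 : (0 : Int) :: pre ++ [c] = 0 :: (pre ++ [c]) := by simp
      rw [show ((rs, (0:Int) :: pre ++ [c], load + (PySem.List.pyGet? dm c).getD 0)
            : List (List Int) × List Int × Int)
          = (rs, 0 :: (pre ++ [c]), load + pvDem dm c) by simp [pvDem]]
      rw [ih rs (pre ++ [c]) (load + pvDem dm c)]
      congr 1
      cases hs : pvSegs dm cap t (load + pvDem dm c) with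
      | nil => simp [pvPrefixFirst, pvConsHead]
      | cons s ss => simp [pvPrefixFirst, pvConsHead]
    · rw [if_neg (by simpa [pvDem] using h)]
      simp only [if_neg h]
      rw [show (((rs ++ [((0:Int) :: pre) ++ [0]]), [0, c], (PySem.List.pyGet? dm c).getD 0)
            : List (List Int) × List Int × Int)
          = (rs ++ [(0 :: pre) ++ [0]], 0 :: [c], pvDem dm c) by simp [pvDem]]
      rw [ih (rs ++ [(0 :: pre) ++ [0]]) [c] (pvDem dm c)]
      cases hs : pvSegs dm cap t (pvDem dm c) with
      | nil => exact absurd hs (pvSegs_ne_nil dm cap t _)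
      | cons s ss => simp [pvPrefixFirst, pvConsHead]

-- B's first pass equals pvBreaks (cast to Int)
theorem pvFoldB_eq (dm : List Int) (cap : Int) (xs : List Int) :
    ∀ (k : Nat) (bs : List Int) (load : Int),
    ((PySem.List.enumerate xs (k : Int)).foldl
      (fun (s : List Int × Int) p =>
        let d := (PySem.List.pyGet? dm p.2).getD 0
        if s.2 + d ≤ cap then (s.1, s.2 + d) else (s.1 ++ [p.1], d)) (bs, load)).1
    = bs ++ (pvBreaks dm cap xs k load).map (fun n : Nat => (n : Int)) := by
  induction xs with
  | nil => intro k bs load; simp [PySem.List.enumerate_nil, pvBreaks]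
  | cons c t ih =>
    intro k bs load
    rw [PySem.List.enumerate_cons]
    simp only [List.foldl_cons, pvBreaks]
    by_cases h : load + pvDem dm c ≤ cap
    · rw [if_pos (by simpa [pvDem] using h), if_pos h]
      have : ((k : Int) + 1) = ((k + 1 : Nat) : Int) := by push_cast; ring
      rw [this, show load + (PySem.List.pyGet? dm c).getD 0 = load + pvDem dm c from rfl]
      exact ih (k + 1) bs (load + pvDem dm c)
    · rw [if_neg (by simpa [pvDem] using h), if_neg h]
      have : ((k : Int) + 1) = ((k + 1 : Nat) : Int) := by push_cast; ring
      rw [this, show (PySem.List.pyGet? dm c).getD 0 = pvDem dm c from rfl]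
      rw [ih (k + 1) (bs ++ [(k : Int)]) (pvDem dm c)]
      simp

-- prefixing one element to the first segment = starting the first slice one position earlier
theorem pvConsSlice (P : List Int) (c : Int) (t : List Int) (bd : List Nat)
    (hne : bd ≠ []) (hge : ∀ b ∈ bd, P.length + 1 ≤ b) :
    pvPairSlices (P ++ c :: t) (P.length :: bd)
    = pvConsHead c (pvPairSlices (P ++ c :: t) ((P.length + 1) :: bd)) := by
  cases bd with
  | nil => exact absurd rfl hne
  | cons b rest =>
    have hb : P.length + 1 ≤ b := hge b (List.mem_cons_self ..)
    simp only [pvPairSlices, List.tail_cons, List.zip_cons_cons, List.map_cons, pvConsHead]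
    congr 1
    have hdrop : (P ++ c :: t).drop P.length = c :: t := by
      simp
    have hdrop1 : (P ++ c :: t).drop (P.length + 1) = t := by
      have h1 : (P ++ c :: t).drop (P.length + 1) = ((P ++ c :: t).drop P.length).drop 1 := by
        rw [List.drop_drop, Nat.add_comm]
      rw [h1, hdrop, List.drop_one, List.tail_cons]
    rw [hdrop, hdrop1]
    have : b - P.length = (b - (P.length + 1)) + 1 := by omega
    rw [this, List.take_succ_cons]

-- the slices at the break bounds are exactly the greedy segments
theorem pvSlices_eq_segs (dm : List Int) (cap : Int) (xs : List Int) :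
    ∀ (P : List Int) (load : Int),
    pvPairSlices (P ++ xs)
      (P.length :: (pvBreaks dm cap xs P.length load ++ [(P ++ xs).length]))
    = pvSegs dm cap xs load := by
  induction xs with
  | nil =>
    intro P load
    simp [pvBreaks, pvSegs, pvPairSlices]
  | cons c t ih =>
    intro P load
    have hlen : (P ++ c :: t).length = ((P ++ [c]) ++ t).length := by simp
    have hP1 : (P ++ [c]).length = P.length + 1 := by simp
    have happ : P ++ c :: t = (P ++ [c]) ++ t := by simp
    have hge : ∀ b ∈ pvBreaks dm cap t (P.length + 1) (load + pvDem dm c) ++ [(P ++ c :: t).length],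
        P.length + 1 ≤ b := by
      intro b hb
      rcases List.mem_append.mp hb with h | h
      · exact pvBreaks_mem_ge dm cap t _ _ b h
      · have hb2 : b = (P ++ c :: t).length := by simpa using h
        subst hb2; rw [List.length_append, List.length_cons]; omega
    have hge' : ∀ b ∈ pvBreaks dm cap t (P.length + 1) (pvDem dm c) ++ [(P ++ c :: t).length],
        P.length + 1 ≤ b := by
      intro b hb
      rcases List.mem_append.mp hb with h | h
      · exact pvBreaks_mem_ge dm cap t _ _ b h
      · have hb2 : b = (P ++ c :: t).length := by simpa using h
        subst hb2; rw [List.length_append, List.length_cons]; omega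
    simp only [pvBreaks, pvSegs]
    by_cases h : load + pvDem dm c ≤ cap
    · rw [if_pos h, if_pos h]
      rw [pvConsSlice P c t _ (by simp) hge]
      congr 1
      have := ih (P ++ [c]) (load + pvDem dm c)
      rw [hP1, ← happ] at this
      rw [hlen] at this ⊢
      exact this
    · rw [if_neg h, if_neg h]
      have hcons : P.length :: (P.length :: pvBreaks dm cap t (P.length + 1) (pvDem dm c)
            ++ [(P ++ c :: t).length])
          = P.length :: P.length :: (pvBreaks dm cap t (P.length + 1) (pvDem dm c)
            ++ [(P ++ c :: t).length]) := by simp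
      rw [hcons]
      have hsplit : pvPairSlices (P ++ c :: t)
          (P.length :: P.length :: (pvBreaks dm cap t (P.length + 1) (pvDem dm c)
            ++ [(P ++ c :: t).length]))
          = ((P ++ c :: t).drop P.length).take (P.length - P.length)
            :: pvPairSlices (P ++ c :: t)
              (P.length :: (pvBreaks dm cap t (P.length + 1) (pvDem dm c)
                ++ [(P ++ c :: t).length])) := by
        simp [pvPairSlices]
      rw [hsplit]
      simp only [Nat.sub_self, List.take_zero]
      congr 1
      rw [pvConsSlice P c t _ (by simp) hge']
      congr 1
      have := ih (P ++ [c]) (pvDem dm c)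
      rw [hP1, ← happ] at this
      rw [hlen] at this ⊢
      exact this

-- Int-level pair slices on cast bounds = Nat-level pvPairSlices
theorem pvPairSlices_cast (L : List Int) : ∀ (bd : List Nat) (prev : Nat),
    ((((prev : Int) :: bd.map (fun n : Nat => (n : Int))).zip (bd.map (fun n : Nat => (n : Int)))).map
      (fun p => PySem.List.slice L (some p.1) (some p.2)))
    = pvPairSlices L (prev :: bd) := by
  intro bd
  induction bd with
  | nil => intro prev; simp [pvPairSlices]
  | cons b rest ih =>
    intro prev
    simp only [pvPairSlices, List.map_cons, List.zip_cons_cons, List.tail_cons]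
    rw [PySem.List.slice_natCast]
    have hih := ih b
    simp only [pvPairSlices, List.tail_cons] at hih
    exact congrArg _ hih

-- ===== VERDICT (by name: the statement is the Claim_ definition above) =====
theorem decode_chromosome_py_spec : Claim_equal_decode_chromosome_py := by
  intro chromosome demands vehicle_capacity _ _
  unfold Spec_decode_chromosome_py
  simp only [decode_chromosome_py, decode_chromosome_py_alt]
  have hB := pvFoldB_eq demands vehicle_capacity chromosome 0 [] 0
  rw [show ((0 : Nat) : Int) = (0 : Int) from rfl, List.nil_append] at hB
  rw [hB]
  rw [pvFoldA_eq demands vehicle_capacity chromosome [] [] 0]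
  simp only [List.cons_append]
  rw [List.tail_cons]
  have hcomp : (fun p : Int × Int => (0 : Int) :: (PySem.List.slice chromosome (some p.1) (some p.2) ++ [0]))
      = (fun s : List Int => (0 : Int) :: (s ++ [0])) ∘ (fun p : Int × Int => PySem.List.slice chromosome (some p.1) (some p.2)) := rfl
  rw [hcomp, ← List.map_map]
  have hc := pvPairSlices_cast chromosome (pvBreaks demands vehicle_capacity chromosome 0 0 ++ [chromosome.length]) 0
  simp only [Nat.cast_zero, List.map_append, List.map_cons, List.map_nil] at hc
  rw [hc]
  have hseg := pvSlices_eq_segs demands vehicle_capacity chromosome [] 0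
  simp only [List.nil_append, List.length_nil] at hseg
  rw [hseg]
  cases hs : pvSegs demands vehicle_capacity chromosome 0 with
  | nil => exact absurd hs (pvSegs_ne_nil _ _ _ _)
  | cons s ss => simp [pvPrefixFirst]
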